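-- pv_equiv track=rewrite | github.com/TianJiaJi/ZX-Answering-Assistant-python | src/extraction/extractor.py | filter_by_grade
-- ===== SOURCE A (Python) =====
-- from typing import Optional, List, Dict
--
-- def filter_by_grade(class_list: List[Dict], grade: str) -> List[Dict]:
--     """
--     根据年级筛选班级列表，并过滤掉重复的班级
--
--     Args:
--         class_list: 班级列表
--         grade: 年级（如"2024"或"2025"）
--
--     Returns:
--         List[Dict]: 筛选后的班级列表
--     """
--     filtered = []
--     seen_class_names = set()
--
--     for cls in class_list:
--         class_grade = cls.get("grade", "")
--         class_name = cls.get("className", "")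
--
--         # 只选择指定年级的班级
--         if class_grade == grade:
--             # 如果班级名称已经出现过，跳过重复的班级
--             if class_name in seen_class_names:
--                 continue
--
--             # 添加班级到过滤列表
--             filtered.append(cls)
--             seen_class_names.add(class_name)
--
--     return filtered
-- ===== SOURCE B (Python) =====
-- def filter_by_grade(class_list, grade):
--     """Keep each grade-matching class iff no earlier grade-matching class shares its
--     className, decided by rescanning the prefix (no auxiliary seen-set)."""
--     def first_here(i, c):
--         name = c.get("className", "")
--         return not any(p.get("grade", "") == grade and p.get("className", "") == name
--                        for p in class_list[:i])
--     return [c for i, c in enumerate(class_list)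
--             if c.get("grade", "") == grade and first_here(i, c)]
-- ===== Notes on version B (the rewrite author's own statement) =====
-- stated objective: alternative
-- what changed: B keeps no seen-set at all: for each element it decides first-occurrence by rescanning the prefix class_list[:i] for an earlier grade-matching class with the same className (stateless quadratic rescan vs A's single stateful pass with a hash set).
import Mathlib
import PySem

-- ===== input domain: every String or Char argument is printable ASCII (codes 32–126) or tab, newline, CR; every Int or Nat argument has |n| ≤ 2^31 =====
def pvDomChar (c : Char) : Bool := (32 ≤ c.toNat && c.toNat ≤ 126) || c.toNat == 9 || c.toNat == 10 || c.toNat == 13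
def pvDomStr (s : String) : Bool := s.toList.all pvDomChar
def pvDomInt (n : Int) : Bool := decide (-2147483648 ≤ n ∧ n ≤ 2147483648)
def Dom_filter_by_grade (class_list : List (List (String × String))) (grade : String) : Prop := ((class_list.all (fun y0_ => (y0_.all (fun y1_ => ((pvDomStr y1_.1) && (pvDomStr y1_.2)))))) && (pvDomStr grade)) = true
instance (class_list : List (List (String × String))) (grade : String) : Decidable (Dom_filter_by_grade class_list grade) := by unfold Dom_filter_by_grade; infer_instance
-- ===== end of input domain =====

-- B keeps no seen-set: first-occurrence is decided by rescanning the prefix class_list[:i]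
-- for an earlier grade-matching class with the same className (objective: alternative).

-- shared helper: cls.get(key, "")
def clsGet (cls : List (String × String)) (key : String) : String :=
  (PySem.Dict.mk cls).getD key ""

-- ===== PORT A =====
def filter_by_grade (class_list : List (List (String × String))) (grade : String) : List (List (String × String)) :=
  (class_list.foldl
    (fun (st : List (List (String × String)) × PySem.Set String) cls =>
      let class_grade := clsGet cls "grade"
      let class_name := clsGet cls "className"
      if class_grade == grade then
        if PySem.Set.contains st.2 class_name then st
        else (st.1 ++ [cls], PySem.Set.add st.2 class_name)
      else st)
    ([], PySem.Set.empty)).1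

-- ===== PORT B =====
-- first_here(i, c): no p in class_list[:i] has p.get("grade","") == grade and the same className
def firstHere (class_list : List (List (String × String))) (grade : String) (i : Int) (c : List (String × String)) : Bool :=
  let name := clsGet c "className"
  !((PySem.List.slice class_list none (some i)).any
      (fun p => clsGet p "grade" == grade && clsGet p "className" == name))

def filter_by_grade_alt (class_list : List (List (String × String))) (grade : String) : List (List (String × String)) :=
  ((PySem.List.enumerate class_list 0).filter
      (fun ic => clsGet ic.2 "grade" == grade && firstHere class_list grade ic.1 ic.2)).map (·.2)

-- ===== PRECONDITION & SPEC =====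
def Spec_filter_by_grade (class_list : List (List (String × String))) (grade : String) (out : List (List (String × String))) : Prop := out = filter_by_grade_alt class_list grade
instance (class_list : List (List (String × String))) (grade : String) (out : List (List (String × String))) : Decidable (Spec_filter_by_grade class_list grade out) := by unfold Spec_filter_by_grade; infer_instance

-- ===== CLAIM (what is proved, stated in full; the proofs are below) =====
def Claim_equal_filter_by_grade : Prop := ∀ (class_list : List (List (String × String))) (grade : String), Dom_filter_by_grade class_list grade → Spec_filter_by_grade class_list grade (filter_by_grade class_list grade)

-- ===== LEMMAS AND PROOFS =====

-- proof-only spec: order-preserving first-occurrence dedup by className, given the names seen so far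
def dedupSpec : List (List (String × String)) → List String → List (List (String × String))
  | [], _ => []
  | c :: rest, seen =>
    if PySem.Set.contains seen (clsGet c "className") then dedupSpec rest seen
    else c :: dedupSpec rest (seen ++ [clsGet c "className"])

-- dedupSpec depends on seen only through membership
lemma dedupSpec_congr : ∀ (xs : List (List (String × String))) (s1 s2 : List String),
    (∀ a, a ∈ s1 ↔ a ∈ s2) → dedupSpec xs s1 = dedupSpec xs s2 := by
  intro xs
  induction xs with
  | nil => intro _ _ _; rfl
  | cons c rest ih =>
    intro s1 s2 h
    have hc : PySem.Set.contains s1 (clsGet c "className")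
            = PySem.Set.contains s2 (clsGet c "className") := by
      simp [PySem.Set.contains, h]
    simp only [dedupSpec, hc]
    by_cases hm : PySem.Set.contains s2 (clsGet c "className") = true
    · simp only [hm, if_true]; exact ih _ _ h
    · simp only [hm, Bool.false_eq_true, ite_false]
      congr 1
      exact ih _ _ (by intro a; simp [h a])

-- names of grade-matching classes in a prefix
def namesOf (grade : String) (pre : List (List (String × String))) : List String :=
  (pre.filter (fun p => clsGet p "grade" == grade)).map (fun p => clsGet p "className")

lemma any_eq_mem_namesOf (grade : String) (pre : List (List (String × String))) (n : String) :
    (pre.any (fun p => clsGet p "grade" == grade && clsGet p "className" == n))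
    = decide (n ∈ namesOf grade pre) := by
  by_cases h : n ∈ namesOf grade pre
  · simp only [h, decide_true, List.any_eq_true]
    obtain ⟨p, hp, hname⟩ := List.mem_map.mp h
    have hpf := List.mem_filter.mp hp
    exact ⟨p, hpf.1, by simp [hpf.2, hname]⟩
  · simp only [h, decide_false]
    rw [List.any_eq_false]
    intro p hp
    simp only [Bool.and_eq_true, beq_iff_eq, not_and]
    intro hgp hn
    exact h (List.mem_map.mpr ⟨p, List.mem_filter.mpr ⟨hp, by simp [hgp]⟩, hn⟩)

-- A's fused fold computes dedupSpec of the grade filter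
lemma foldA_eq (grade : String) :
    ∀ (xs : List (List (String × String))) (acc : List (List (String × String))) (seen : PySem.Set String),
    (xs.foldl
      (fun (st : List (List (String × String)) × PySem.Set String) cls =>
        let class_grade := clsGet cls "grade"
        let class_name := clsGet cls "className"
        if class_grade == grade then
          if PySem.Set.contains st.2 class_name then st
          else (st.1 ++ [cls], PySem.Set.add st.2 class_name)
        else st)
      (acc, seen)).1
    = acc ++ dedupSpec (xs.filter (fun c => clsGet c "grade" == grade)) seen := by
  intro xs
  induction xs with
  | nil => intro acc seen; simp [dedupSpec]
  | cons c rest ih =>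
    intro acc seen
    simp only [List.foldl_cons]
    by_cases hg : (clsGet c "grade" == grade) = true
    · by_cases hc : PySem.Set.contains seen (clsGet c "className") = true
      · have hm : clsGet c "className" ∈ seen := by
          simpa [PySem.Set.contains] using hc
        simp only [hg, hc, if_true]
        rw [ih]
        simp [dedupSpec, hg, hm]
      · simp only [Bool.not_eq_true] at hc
        have hm : clsGet c "className" ∉ seen := by
          simpa [PySem.Set.contains] using hc
        simp only [hg, hc, if_true, Bool.false_eq_true, ite_false]
        rw [ih]
        simp [dedupSpec, hg, hm, PySem.Set.add, List.append_assoc]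
    · simp only [Bool.not_eq_true] at hg
      simp only [hg, Bool.false_eq_true, ite_false]
      rw [ih]
      simp [hg]

-- B's prefix-rescan computes dedupSpec of the grade filter, seen = names in the prefix
lemma rescan_eq (grade : String) :
    ∀ (suf pre : List (List (String × String))),
    ((PySem.List.enumerate suf (pre.length : Int)).filter
        (fun ic => clsGet ic.2 "grade" == grade && firstHere (pre ++ suf) grade ic.1 ic.2)).map (·.2)
    = dedupSpec (suf.filter (fun c => clsGet c "grade" == grade)) (namesOf grade pre) := by
  intro suf
  induction suf with
  | nil => intro pre; simp [dedupSpec]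
  | cons c rest ih =>
    intro pre
    rw [PySem.List.enumerate_cons]
    have htake : PySem.List.slice (pre ++ c :: rest) none (some (pre.length : Int)) = pre := by
      rw [PySem.List.slice_to_natCast]
      simp
    have hfh : firstHere (pre ++ c :: rest) grade (pre.length : Int) c
             = !decide (clsGet c "className" ∈ namesOf grade pre) := by
      simp only [firstHere, htake, any_eq_mem_namesOf]
    have hstep : ((pre.length : Int) + 1) = (((pre ++ [c]).length : Nat) : Int) := by
      simp
    have hrest := ih (pre ++ [c])
    rw [List.append_assoc] at hrest
    simp only [List.cons_append, List.nil_append] at hrest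
    by_cases hg : (clsGet c "grade" == grade) = true
    · by_cases hm : clsGet c "className" ∈ namesOf grade pre
      · have : firstHere (pre ++ c :: rest) grade (pre.length : Int) c = false := by
          rw [hfh]; simp [hm]
        simp only [List.filter_cons, hg, this, Bool.and_false, Bool.false_eq_true, ite_false]
        rw [hstep, hrest]
        have hnames : namesOf grade (pre ++ [c]) = namesOf grade pre ++ [clsGet c "className"] := by
          simp [namesOf, hg]
        rw [hnames]
        have hcont : PySem.Set.contains (namesOf grade pre) (clsGet c "className") = true := by
          simpa [PySem.Set.contains] using hm
        simp only [dedupSpec, if_true, hcont]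
        exact dedupSpec_congr _ _ _ (by
          intro a
          simp only [List.mem_append, List.mem_singleton]
          constructor
          · rintro (h | rfl)
            · exact h
            · exact hm
          · exact Or.inl)
      · have : firstHere (pre ++ c :: rest) grade (pre.length : Int) c = true := by
          rw [hfh]; simp [hm]
        simp only [List.filter_cons, hg, this, Bool.and_true, if_true, List.map_cons]
        rw [hstep, hrest]
        have hnames : namesOf grade (pre ++ [c]) = namesOf grade pre ++ [clsGet c "className"] := by
          simp [namesOf, hg]
        have hcont : ¬ PySem.Set.contains (namesOf grade pre) (clsGet c "className") = true := by
          simpa [PySem.Set.contains] using hm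
        rw [hnames]
        simp only [dedupSpec, hcont, Bool.false_eq_true, ite_false]
    · simp only [Bool.not_eq_true] at hg
      simp only [List.filter_cons, hg, Bool.false_and, Bool.false_eq_true, ite_false]
      rw [hstep, hrest]
      have hnames : namesOf grade (pre ++ [c]) = namesOf grade pre := by
        simp [namesOf, hg]
      rw [hnames]

-- ===== VERDICT (by name: the statement is the Claim_ definition above) =====
theorem filter_by_grade_spec : Claim_equal_filter_by_grade := by
  intro class_list grade _
  unfold Spec_filter_by_grade filter_by_grade filter_by_grade_alt
  rw [foldA_eq]
  have := rescan_eq grade class_list []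
  simp only [List.nil_append, List.length_nil, Nat.cast_zero] at this
  rw [this]
  simp [namesOf, PySem.Set.empty]
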